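-- pv_equiv track=rewrite | github.com/CheYulin/yuanrong-datasystem-agent-workbench | scripts/metrics/gen_kv_perf_report.py | format_bench_section
-- ===== SOURCE A (Python) =====
-- from typing import Any, Dict, Iterable, List, Optional, Tuple
--
-- def format_bench_section(stats: Dict[str, str]) -> str:
--     if not stats:
--         return ""
--     lines = ["#### 压测工具采集（来自 --bench-stats）", ""]
--     order = [
--         ("Total", "Total"),
--         ("Success", "Success"),
--         ("Fail", "Fail"),
--         ("Avg_ms", "Avg（ms）"),
--         ("P90_ms", "P90（ms）"),
--         ("P99_ms", "P99（ms）"),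
--         ("Min_ms", "Min（ms）"),
--         ("Max_ms", "Max（ms）"),
--         ("QPS", "QPS"),
--         ("Throughput_MBs", "Throughput（MB/s）"),
--     ]
--     for key, label in order:
--         if key in stats:
--             lines.append(f"- **{label}**: {stats[key]}")
--     for k, v in sorted(stats.items()):
--         if k not in {x[0] for x in order}:
--             lines.append(f"- **{k}**: {v}")
--     lines.append("")
--     return "\n".join(lines)
-- ===== SOURCE B (Python) =====
-- def format_bench_section(stats):
--     if not stats:
--         return ""
--     order = [
--         ("Total", "Total"),
--         ("Success", "Success"),
--         ("Fail", "Fail"),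
--         ("Avg_ms", "Avg（ms）"),
--         ("P90_ms", "P90（ms）"),
--         ("P99_ms", "P99（ms）"),
--         ("Min_ms", "Min（ms）"),
--         ("Max_ms", "Max（ms）"),
--         ("QPS", "QPS"),
--         ("Throughput_MBs", "Throughput（MB/s）"),
--     ]
--     rank = {k: i for i, (k, _) in enumerate(order)}
--     label = dict(order)
--     lines = ["#### 压测工具采集（来自 --bench-stats）", ""]
--     for k in sorted(stats, key=lambda k: (rank.get(k, len(order)), k)):
--         lines.append(f"- **{label.get(k, k)}**: {stats[k]}")
--     lines.append("")
--     return "\n".join(lines)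
-- ===== Notes on version B (the rewrite author's own statement) =====
-- stated objective: alternative
-- what changed: Replaces A's two output passes (a scan over the fixed order table plus a separate sorted scan over the leftover items) by rank/label lookup tables built once from the table and a single pass over the keys sorted under the composite key (rank, key).
import Mathlib
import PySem

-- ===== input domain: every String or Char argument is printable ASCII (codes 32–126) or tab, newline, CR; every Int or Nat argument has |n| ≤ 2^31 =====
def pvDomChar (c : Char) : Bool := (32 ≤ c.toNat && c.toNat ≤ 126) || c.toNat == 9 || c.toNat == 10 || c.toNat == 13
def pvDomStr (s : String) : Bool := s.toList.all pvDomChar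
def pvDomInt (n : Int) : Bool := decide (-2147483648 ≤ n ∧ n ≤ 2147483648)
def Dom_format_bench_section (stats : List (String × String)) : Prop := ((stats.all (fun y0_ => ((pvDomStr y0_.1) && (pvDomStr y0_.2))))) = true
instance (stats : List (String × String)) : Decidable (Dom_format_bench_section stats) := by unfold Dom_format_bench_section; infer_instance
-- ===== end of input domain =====

-- B replaces A's two output passes (fixed-order scan + sorted leftovers scan) by ONE pass over the
-- keys sorted under the composite key (rank, key), using rank/label tables built from `order`
-- (objective: alternative decomposition, same cost).

-- the fixed `order` table shared by both programs
def pvOrder : List (String × String) :=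
  [("Total", "Total"), ("Success", "Success"), ("Fail", "Fail"),
   ("Avg_ms", "Avg（ms）"), ("P90_ms", "P90（ms）"), ("P99_ms", "P99（ms）"),
   ("Min_ms", "Min（ms）"), ("Max_ms", "Max（ms）"),
   ("QPS", "QPS"), ("Throughput_MBs", "Throughput（MB/s）")]

-- ===== PORT A =====
def format_bench_section (stats : List (String × String)) : String :=
  if stats.isEmpty then "" else
    let d := PySem.Dict.ofList stats
    let lines : List String := ["#### 压测工具采集（来自 --bench-stats）", ""]
    let lines := pvOrder.foldl (fun acc kl =>
        if d.contains kl.1 then acc ++ ["- **" ++ kl.2 ++ "**: " ++ d.getD kl.1 ""] else acc) lines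
    let orderKeys := PySem.Set.ofList (pvOrder.map Prod.fst)
    -- dict keys are unique, so sorted(stats.items()) orders the pairs by their key component
    let lines := (PySem.List.sorted d.items (fun kv => kv.1) false).foldl (fun acc kv =>
        if !(PySem.Set.contains orderKeys kv.1) then acc ++ ["- **" ++ kv.1 ++ "**: " ++ kv.2] else acc) lines
    PySem.Str.join "\n" (lines ++ [""])

-- ===== PORT B =====
-- rank = {k: i for i, (k, _) in enumerate(order)};  label = dict(order)
def pvRank : PySem.Dict String Int :=
  PySem.Dict.ofList ((PySem.List.enumerate pvOrder 0).map (fun p => (p.2.1, p.1)))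
def pvLabel : PySem.Dict String String := PySem.Dict.ofList pvOrder

def format_bench_section_alt (stats : List (String × String)) : String :=
  if stats.isEmpty then "" else
    let d := PySem.Dict.ofList stats
    -- sorted(stats, key=lambda k: (rank.get(k, len(order)), k)) — the tuple key is lexicographic
    let sortedKeys := PySem.List.sorted d.keys
        (fun k => toLex (pvRank.getD k ((pvOrder.length : Int)), k)) false
    let lines : List String := ["#### 压测工具采集（来自 --bench-stats）", ""] ++
        sortedKeys.map (fun k => "- **" ++ pvLabel.getD k k ++ "**: " ++ d.getD k "")
    PySem.Str.join "\n" (lines ++ [""])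

-- ===== PRECONDITION & SPEC =====
def Spec_format_bench_section (stats : List (String × String)) (out : String) : Prop := out = format_bench_section_alt stats
instance (stats : List (String × String)) (out : String) : Decidable (Spec_format_bench_section stats out) := by unfold Spec_format_bench_section; infer_instance

-- ===== CLAIM (what is proved, stated in full; the proofs are below) =====
def Claim_equal_format_bench_section : Prop := ∀ (stats : List (String × String)), Dom_format_bench_section stats → Spec_format_bench_section stats (format_bench_section stats)

-- ===== LEMMAS AND PROOFS =====

-- proof-side abbreviations
def pvKnown : List String := pvOrder.map Prod.fst
def pvKf (k : String) : Lex (Int × String) := toLex (pvRank.getD k ((pvOrder.length : Int)), k)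

theorem pvKnown_nodup : pvKnown.Nodup := by decide

theorem pvKf_pairwise : pvKnown.Pairwise (fun a b => pvKf a < pvKf b) := by decide

theorem pvRank_lt_of_known : ∀ k ∈ pvKnown, pvRank.getD k ((pvOrder.length : Int)) < (pvOrder.length : Int) := by decide

theorem pvRank_keys : pvRank.keys = pvKnown := by decide

theorem pvLabel_keys : pvLabel.keys = pvKnown := by decide

theorem pvRank_of_unknown (k : String) (hk : k ∉ pvKnown) :
    pvRank.getD k ((pvOrder.length : Int)) = (pvOrder.length : Int) := by
  have hc : pvRank.contains k = false := by
    rw [PySem.Dict.contains_eq_decide_mem_keys, pvRank_keys]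
    simpa using hk
  exact PySem.Dict.getD_of_not_contains _ _ hc

theorem pvLabel_of_unknown (k : String) (hk : k ∉ pvKnown) : pvLabel.getD k k = k := by
  have hc : pvLabel.contains k = false := by
    rw [PySem.Dict.contains_eq_decide_mem_keys, pvLabel_keys]
    simpa using hk
  exact PySem.Dict.getD_of_not_contains _ _ hc

theorem pvLabel_of_order : ∀ kl ∈ pvOrder, pvLabel.getD kl.1 kl.1 = kl.2 := by decide

-- B's single sort splits into: the present known keys in `order` order, then the sorted unknown keys
theorem pvSortB (d : PySem.Dict String String) (hnd : d.keys.Nodup) :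
    PySem.List.sorted d.keys (fun k => toLex (pvRank.getD k ((pvOrder.length : Int)), k)) false
      = (pvOrder.filter (fun kl => d.contains kl.1)).map Prod.fst
        ++ PySem.List.sorted (d.keys.filter (fun k => !(pvKnown.contains k))) (fun k => k) false := by
  apply PySem.List.sorted_eq_of_perm_of_pairwise_lt
  · -- Perm
    have hsub : ((pvOrder.filter (fun kl => d.contains kl.1)).map Prod.fst).Sublist pvKnown :=
      List.Sublist.map Prod.fst List.filter_sublist
    have hnd1 : ((pvOrder.filter (fun kl => d.contains kl.1)).map Prod.fst).Nodup :=
      pvKnown_nodup.sublist hsub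
    have h1 : ((pvOrder.filter (fun kl => d.contains kl.1)).map Prod.fst).Perm
        (d.keys.filter (fun k => pvKnown.contains k)) := by
      rw [List.perm_ext_iff_of_nodup hnd1 (hnd.filter _)]
      intro a
      simp only [List.mem_map, List.mem_filter, List.contains_iff_mem]
      constructor
      · rintro ⟨kl, ⟨hmem, hcont⟩, rfl⟩
        refine ⟨(PySem.Dict.contains_iff_mem_keys d kl.1).mp hcont, ?_⟩
        exact List.mem_map_of_mem hmem
      · rintro ⟨hka, hkn⟩
        have : a ∈ pvKnown := by simpa using hkn
        rcases List.mem_map.mp this with ⟨kl, hmem, rfl⟩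
        exact ⟨kl, ⟨hmem, (PySem.Dict.contains_iff_mem_keys d kl.1).mpr hka⟩, rfl⟩
    have h2 := PySem.List.sorted_perm (d.keys.filter (fun k => !(pvKnown.contains k))) (fun k => k) false
    exact (h1.append h2).trans (List.filter_append_perm _ d.keys)
  · -- Pairwise
    rw [List.pairwise_append]
    refine ⟨?_, ?_, ?_⟩
    · exact pvKf_pairwise.sublist (List.Sublist.map Prod.fst List.filter_sublist)
    · have hnd2 : (PySem.List.sorted (d.keys.filter (fun k => !(pvKnown.contains k))) (fun k => k) false).Nodup :=
        ((PySem.List.sorted_perm _ _ _).symm).nodup (hnd.filter _)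
      have hle := PySem.List.sorted_pairwise (d.keys.filter (fun k => !(pvKnown.contains k))) (fun k => k)
      have hlt : (PySem.List.sorted (d.keys.filter (fun k => !(pvKnown.contains k))) (fun k => k) false).Pairwise (· < ·) :=
        (hle.and hnd2).imp (fun h => lt_of_le_of_ne h.1 h.2)
      refine hlt.imp_of_mem (fun {a b} ha hb hab => ?_)
      have hau : a ∉ pvKnown := by
        have := (PySem.List.mem_sorted _ _ _ _).mp ha
        simpa using (List.mem_filter.mp this).2
      have hbu : b ∉ pvKnown := by
        have := (PySem.List.mem_sorted _ _ _ _).mp hb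
        simpa using (List.mem_filter.mp this).2
      refine Prod.Lex.lt_iff.mpr (Or.inr ⟨?_, hab⟩)
      simp [pvRank_of_unknown a hau, pvRank_of_unknown b hbu]
    · intro a ha b hb
      have hak : a ∈ pvKnown := by
        rcases List.mem_map.mp ha with ⟨kl, hm, rfl⟩
        exact List.mem_map_of_mem (List.filter_sublist.mem hm)
      have hbu : b ∉ pvKnown := by
        have := (PySem.List.mem_sorted _ _ _ _).mp hb
        simpa using (List.mem_filter.mp this).2
      refine Prod.Lex.lt_iff.mpr (Or.inl ?_)
      simpa [pvRank_of_unknown b hbu] using pvRank_lt_of_known a hak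


-- A's sort of the items is the sort of the keys, paired with their values
theorem pvSortA (d : PySem.Dict String String) (hnd : d.keys.Nodup) :
    PySem.List.sorted d.items (fun kv => kv.1) false
      = (PySem.List.sorted d.keys (fun k => k) false).map (fun k => (k, d.getD k "")) := by
  apply PySem.List.sorted_eq_of_perm_of_pairwise_lt
  · rw [PySem.Dict.items_eq_map_keys d hnd ""]
    exact (PySem.List.sorted_perm _ _ _).map _
  · rw [List.pairwise_map]
    have hnd2 : (PySem.List.sorted d.keys (fun k => k) false).Nodup :=
      ((PySem.List.sorted_perm _ _ _).symm).nodup hnd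
    exact ((PySem.List.sorted_pairwise d.keys (fun k => k)).and hnd2).imp (fun h => lt_of_le_of_ne h.1 h.2)


-- filtering a sorted nodup list = sorting the filtered list
theorem pvFilterSorted (l : List String) (hnd : l.Nodup) (q : String → Bool) :
    (PySem.List.sorted l (fun k => k) false).filter q
      = PySem.List.sorted (l.filter q) (fun k => k) false := by
  symm
  apply PySem.List.sorted_eq_of_perm_of_pairwise_lt
  · exact (PySem.List.sorted_perm l (fun k => k) false).filter q
  · have hnd2 : (PySem.List.sorted l (fun k => k) false).Nodup :=
      ((PySem.List.sorted_perm _ _ _).symm).nodup hnd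
    exact List.Pairwise.sublist List.filter_sublist
      (((PySem.List.sorted_pairwise l (fun k => k)).and hnd2).imp (fun h => lt_of_le_of_ne h.1 h.2))


-- ===== VERDICT (by name: the statement is the Claim_ definition above) =====
theorem pvSetContains (x : String) :
    PySem.Set.contains (PySem.Set.ofList (pvOrder.map Prod.fst)) x = pvKnown.contains x := by
  rw [show pvOrder.map Prod.fst = pvKnown from rfl,
    PySem.Set.ofList_eq_self_of_nodup _ pvKnown_nodup]
  rfl

theorem format_bench_section_spec : Claim_equal_format_bench_section := by
  intro stats _
  unfold Spec_format_bench_section format_bench_section format_bench_section_alt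
  cases hs : stats.isEmpty
  case true => rfl
  case false =>
  simp only [Bool.false_eq_true, if_false]
  have hnd := PySem.Dict.nodup_keys_ofList stats
  set d := PySem.Dict.ofList stats with hd
  rw [PySem.List.foldl_append_if, PySem.List.foldl_append_if,
    pvSortA d hnd, List.filter_map, pvSortB d hnd]
  have hpred : ((fun kv : String × String => !(PySem.Set.ofList (List.map Prod.fst pvOrder)).contains kv.1)
      ∘ (fun k => (k, d.getD k ""))) = (fun k => !pvKnown.contains k) := by
    funext k
    simp only [Function.comp_apply]
    rw [pvSetContains]
  rw [hpred, pvFilterSorted d.keys hnd (fun k => !pvKnown.contains k)]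
  simp only [List.map_map, List.map_append, List.append_assoc]
  have e1 : List.map (fun kl => "- **" ++ kl.2 ++ "**: " ++ d.getD kl.1 "")
        (List.filter (fun kl => d.contains kl.1) pvOrder)
      = List.map ((fun k => "- **" ++ pvLabel.getD k k ++ "**: " ++ d.getD k "") ∘ Prod.fst)
        (List.filter (fun kl => d.contains kl.1) pvOrder) := by
    refine List.map_congr_left (fun kl hm => ?_)
    simp only [Function.comp_apply]
    rw [pvLabel_of_order kl (List.mem_filter.mp hm).1]
  have e2 : List.map ((fun kv : String × String => "- **" ++ kv.1 ++ "**: " ++ kv.2) ∘ (fun k => (k, d.getD k "")))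
        (PySem.List.sorted (List.filter (fun k => !pvKnown.contains k) d.keys) (fun k => k) false)
      = List.map (fun k => "- **" ++ pvLabel.getD k k ++ "**: " ++ d.getD k "")
        (PySem.List.sorted (List.filter (fun k => !pvKnown.contains k) d.keys) (fun k => k) false) := by
    refine List.map_congr_left (fun k hm => ?_)
    have hk : k ∉ pvKnown := by
      have := (PySem.List.mem_sorted _ _ _ _).mp hm
      simpa using (List.mem_filter.mp this).2
    simp only [Function.comp_apply]
    rw [pvLabel_of_unknown k hk]
  rw [e1, e2]
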